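-- pv_equiv track=rewrite | github.com/lbellomo/etudes | 2016/day_04/main.py | check_checksum
-- ===== SOURCE A (Python) =====
-- from collections import Counter
--
-- def check_checksum(letters: str, checksum: str) -> bool:
--     counter = Counter(letters)
--     # sort alfabetical first, and then by count
--     sorted_counter = sorted(
--         sorted(counter.items(), key=lambda x: x[0]), key=lambda x: x[1], reverse=True
--     )
--     # keep only the fisrt 5 (the checksum len)
--     most_common = "".join(i[0] for i in sorted_counter[:5])
--
--     if most_common == checksum:
--         return True
--     return False
-- ===== SOURCE B (Python) =====
-- def check_checksum(letters: str, checksum: str) -> bool: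
--     counts = {}
--     for ch in letters:
--         counts[ch] = counts.get(ch, 0) + 1
--     pool = list(counts.items())
--     picked = []
--     for _ in range(5):
--         if not pool:
--             break
--         best = pool[0]
--         for item in pool[1:]:
--             if best[1] < item[1] or (item[1] == best[1] and item[0] < best[0]):
--                 best = item
--         picked.append(best[0])
--         pool.remove(best)
--     return "".join(picked) == checksum
-- ===== Notes on version B (the rewrite author's own statement) =====
-- stated objective: alternative
-- what changed: Replaces the double stable sort of all counter items with a top-5 selection by repeated max-scan over the count pool (count-descending, letter-ascending tie-break), removing the best item each pass.
import Mathlib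
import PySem

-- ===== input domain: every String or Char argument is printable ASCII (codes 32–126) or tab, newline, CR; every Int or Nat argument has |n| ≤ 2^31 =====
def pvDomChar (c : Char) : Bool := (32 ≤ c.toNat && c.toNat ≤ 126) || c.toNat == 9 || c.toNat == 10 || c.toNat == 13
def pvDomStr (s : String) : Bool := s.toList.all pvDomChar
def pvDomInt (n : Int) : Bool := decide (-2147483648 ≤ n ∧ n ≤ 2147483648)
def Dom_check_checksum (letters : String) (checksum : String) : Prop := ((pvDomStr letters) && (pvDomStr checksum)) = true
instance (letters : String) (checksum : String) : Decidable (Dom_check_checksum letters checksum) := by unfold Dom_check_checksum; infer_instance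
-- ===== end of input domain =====

-- B replaces A's double stable sort with a 5-pass selection-by-max-scan over the count pool; equal return value, no speed claim.

-- ===== PORT A =====
def check_checksum (letters : String) (checksum : String) : Bool :=
  let counter := PySem.Dict.counter letters.toList
  -- sort alfabetical first, and then by count (reverse)
  let sorted_counter :=
    PySem.List.sorted (PySem.List.sorted counter.items (fun x => x.1) false) (fun x => x.2) true
  -- keep only the first 5
  let most_common := String.mk ((PySem.List.slice sorted_counter none (some 5)).map (fun i => i.1))
  if most_common = checksum then true else false

-- ===== PORT B =====
-- does item beat the current best (larger count, or equal count and smaller letter)?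
def pvBetter (best item : Char × Int) : Bool :=
  best.2 < item.2 || (item.2 == best.2 && item.1 < best.1)

-- the 'for _ in range(5)' selection loop: pick the best of the pool, remove it, recurse
def pvSelect : Nat → List (Char × Int) → List Char
  | 0, _ => []
  | _ + 1, [] => []
  | n + 1, p :: ps =>
    let best := ps.foldl (fun b item => if pvBetter b item then item else b) p
    best.1 :: pvSelect n ((p :: ps).erase best)

def check_checksum_alt (letters : String) (checksum : String) : Bool :=
  let counts := letters.toList.foldl (fun d ch => d.insert ch (d.getD ch 0 + 1)) PySem.Dict.empty
  let picked := pvSelect 5 counts.items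
  decide (String.mk picked = checksum)

-- ===== PRECONDITION & SPEC =====
def Spec_check_checksum (letters : String) (checksum : String) (out : Bool) : Prop := out = check_checksum_alt letters checksum
instance (letters : String) (checksum : String) (out : Bool) : Decidable (Spec_check_checksum letters checksum out) := by unfold Spec_check_checksum; infer_instance

-- ===== CLAIM (what is proved, stated in full; the proofs are below) =====
def Claim_equal_check_checksum : Prop := ∀ (letters : String) (checksum : String), Dom_check_checksum letters checksum → Spec_check_checksum letters checksum (check_checksum letters checksum)

-- ===== LEMMAS AND PROOFS =====

-- The order in which A's double sort lays out the items: count descending, letter ascending on ties.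
def pvR (a b : Char × Int) : Prop := b.2 < a.2 ∨ (a.2 = b.2 ∧ a.1 < b.1)

theorem pvR_irrefl (a : Char × Int) : ¬ pvR a a := by
  simp [pvR]

theorem pvR_trans {a b c : Char × Int} (h1 : pvR a b) (h2 : pvR b c) : pvR a c := by
  rcases h1 with h1 | ⟨h1, h1'⟩ <;> rcases h2 with h2 | ⟨h2, h2'⟩
  · exact Or.inl (lt_trans h2 h1)
  · exact Or.inl (h2 ▸ h1)
  · exact Or.inl (h1 ▸ h2)
  · exact Or.inr ⟨h1.trans h2, lt_trans h1' h2'⟩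

theorem pvR_total (a b : Char × Int) : pvR a b ∨ pvR b a ∨ (a.1 = b.1 ∧ a.2 = b.2) := by
  rcases lt_trichotomy a.2 b.2 with h | h | h
  · exact Or.inr (Or.inl (Or.inl h))
  · rcases lt_trichotomy a.1 b.1 with h' | h' | h'
    · exact Or.inl (Or.inr ⟨h, h'⟩)
    · exact Or.inr (Or.inr ⟨h', h⟩)
    · exact Or.inr (Or.inl (Or.inr ⟨h.symm, h'⟩))
  · exact Or.inl (Or.inl h)

theorem pvBetter_iff (b x : Char × Int) : pvBetter b x = true ↔ pvR x b := by
  simp [pvBetter, pvR]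

-- the inner max-scan of B
def pvPick (p : Char × Int) (ps : List (Char × Int)) : Char × Int :=
  ps.foldl (fun b item => if pvBetter b item then item else b) p

theorem pvSelect_succ_cons (n : Nat) (p : Char × Int) (ps : List (Char × Int)) :
    pvSelect (n + 1) (p :: ps) = (pvPick p ps).1 :: pvSelect n ((p :: ps).erase (pvPick p ps)) := rfl

-- the max-scan returns an element of the pool that no pool member beats
theorem pvPick_spec (ps : List (Char × Int)) (p : Char × Int) :
    pvPick p ps ∈ p :: ps ∧ ∀ y ∈ p :: ps, ¬ pvR y (pvPick p ps) := by
  induction ps generalizing p with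
  | nil =>
    refine ⟨by simp [pvPick], ?_⟩
    intro y hy
    simp only [List.mem_singleton] at hy
    rw [hy]
    simpa [pvPick] using pvR_irrefl p
  | cons x t ih =>
    by_cases hb : pvBetter p x = true
    · have hstep : pvPick p (x :: t) = pvPick x t := by simp [pvPick, hb]
      obtain ⟨hmem, hbest⟩ := ih x
      rw [hstep]
      refine ⟨List.mem_cons_of_mem _ hmem, ?_⟩
      intro y hy hyr
      rcases List.mem_cons.1 hy with rfl | hy2
      · exact hbest x List.mem_cons_self (pvR_trans ((pvBetter_iff _ _).1 hb) hyr)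
      · exact hbest y hy2 hyr
    · have hstep : pvPick p (x :: t) = pvPick p t := by simp [pvPick, hb]
      obtain ⟨hmem, hbest⟩ := ih p
      rw [hstep]
      refine ⟨?_, ?_⟩
      · rcases List.mem_cons.1 hmem with h | h
        · rw [h]; exact List.mem_cons_self
        · exact List.mem_cons_of_mem _ (List.mem_cons_of_mem _ h)
      · intro y hy hyr
        rcases List.mem_cons.1 hy with rfl | hy2
        · exact hbest y List.mem_cons_self hyr
        rcases List.mem_cons.1 hy2 with rfl | hy3
        · have hnxp : ¬ pvR y p := fun hc => hb ((pvBetter_iff _ _).2 hc)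
          have hnp : ¬ pvR p (pvPick p t) := hbest p List.mem_cons_self
          rcases pvR_total p (pvPick p t) with hpr | hrp | ⟨he1, he2⟩
          · exact hnp hpr
          · exact hnxp (pvR_trans hyr hrp)
          · apply hnxp
            rcases hyr with hc | ⟨hc, hc'⟩
            · exact Or.inl (by rw [he2]; exact hc)
            · exact Or.inr ⟨hc.trans he2.symm, by rw [he1]; exact hc'⟩
        · exact hbest y (List.mem_cons_of_mem _ hy3) hyr

-- the max-scan returns exactly the head of any pvR-sorted arrangement of the pool
theorem pvPick_eq_head (p : Char × Int) (ps : List (Char × Int)) (m : Char × Int)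
    (s' : List (Char × Int)) (hperm : (m :: s').Perm (p :: ps))
    (hpair : (m :: s').Pairwise pvR) :
    pvPick p ps = m := by
  rcases pvPick_spec ps p with ⟨hmem, hbest⟩
  have hrS : pvPick p ps ∈ m :: s' := hperm.mem_iff.2 hmem
  rcases List.mem_cons.1 hrS with h | h
  · exact h
  · exfalso
    have hmR : pvR m (pvPick p ps) := (List.pairwise_cons.1 hpair).1 _ h
    have hmPool : m ∈ p :: ps := hperm.mem_iff.1 List.mem_cons_self
    exact hbest m hmPool hmR

-- the whole selection loop produces the first n letters of any pvR-sorted arrangement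
theorem pvSelect_eq_take (n : Nat) :
    ∀ (pool s : List (Char × Int)), s.Perm pool → s.Pairwise pvR →
      pvSelect n pool = (s.take n).map (fun i => i.1) := by
  induction n with
  | zero => intro pool s _ _; simp [pvSelect]
  | succ n ih =>
    intro pool s hperm hpair
    cases pool with
    | nil =>
      have : s = [] := List.Perm.eq_nil hperm
      subst this; simp [pvSelect]
    | cons p ps =>
      cases s with
      | nil => exact absurd hperm.symm (by simp)
      | cons m s' =>
        have hbest := pvPick_eq_head p ps m s' hperm hpair
        rw [pvSelect_succ_cons, hbest, List.take_succ_cons, List.map_cons]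
        refine congrArg _ ?_
        have hperm' : s'.Perm ((p :: ps).erase m) := by
          have := hperm.erase (a := m)
          rwa [List.erase_cons_head] at this
        exact ih _ s' hperm' (List.pairwise_cons.1 hpair).2

-- stability: one insertion step of A's second (count-descending) sort preserves Pairwise pvR,
-- given every equal-count element already placed has a smaller letter
theorem insertBy_pairwise_pvR (x : Char × Int) :
    ∀ (acc : List (Char × Int)), acc.Pairwise pvR →
      (∀ a ∈ acc, a.2 = x.2 → a.1 < x.1) →
      (PySem.List.insertBy (fun a b => decide (b.2 < a.2)) x acc).Pairwise pvR := by
  intro acc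
  induction acc with
  | nil => intro _ _; simp [PySem.List.insertBy]
  | cons y ys ih =>
    intro hpair hcross
    rcases List.pairwise_cons.1 hpair with ⟨hy, hys⟩
    by_cases hb : y.2 < x.2
    · simp only [PySem.List.insertBy, hb, decide_true, if_true]
      refine List.pairwise_cons.2 ⟨?_, hpair⟩
      intro z hz
      rcases List.mem_cons.1 hz with h | h
      · subst h; exact Or.inl hb
      · have hyz : pvR y z := hy z h
        refine Or.inl ?_
        rcases hyz with hc | ⟨hc, _⟩
        · exact lt_trans hc hb
        · exact hc ▸ hb
    · simp only [PySem.List.insertBy, hb, decide_false]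
      refine List.pairwise_cons.2 ⟨?_, ih hys (fun a ha => hcross a (List.mem_cons_of_mem _ ha))⟩
      intro z hz
      rcases (PySem.List.mem_insertBy _ _ _ _).1 hz with h | h
      · subst h
        rcases lt_or_eq_of_le (not_lt.1 hb) with hlt | heq
        · exact Or.inl hlt
        · exact Or.inr ⟨heq.symm, hcross y List.mem_cons_self heq.symm⟩
      · exact hy z h

-- A's second sort, run over a letter-strictly-increasing list, is Pairwise pvR
theorem foldl_insertBy_pairwise_pvR :
    ∀ (xs acc : List (Char × Int)), acc.Pairwise pvR →
      (∀ a ∈ acc, ∀ b ∈ xs, a.2 = b.2 → a.1 < b.1) →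
      xs.Pairwise (fun a b => a.1 < b.1) →
      (xs.foldl (fun acc x => PySem.List.insertBy (fun a b => decide (b.2 < a.2)) x acc) acc).Pairwise pvR := by
  intro xs
  induction xs with
  | nil => intro acc h _ _; simpa using h
  | cons x t ih =>
    intro acc hacc hcross hxs
    rcases List.pairwise_cons.1 hxs with ⟨hx, ht⟩
    simp only [List.foldl_cons]
    refine ih _ (insertBy_pairwise_pvR x acc hacc
        (fun a ha he => hcross a ha x List.mem_cons_self he)) ?_ ht
    intro a ha b hb he
    rcases (PySem.List.mem_insertBy _ _ _ _).1 ha with h | h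
    · subst h; exact hx b hb
    · exact hcross a h b (List.mem_cons_of_mem _ hb) he

theorem sorted_rev_pairwise_pvR (xs : List (Char × Int))
    (h : xs.Pairwise (fun a b => a.1 < b.1)) :
    (PySem.List.sorted xs (fun x => x.2) true).Pairwise pvR := by
  rw [PySem.List.sorted_rev_eq_foldl_insertBy]
  exact foldl_insertBy_pairwise_pvR xs [] (by simp) (by simp) h

-- A's doubly sorted counter list is a pvR-sorted arrangement of the counter items
theorem sorted_counter_spec (cs : List Char) :
    ((PySem.List.sorted (PySem.List.sorted (PySem.Dict.counter cs).items (fun x => x.1) false)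
        (fun x => x.2) true).Perm (PySem.Dict.counter cs).items) ∧
    (PySem.List.sorted (PySem.List.sorted (PySem.Dict.counter cs).items (fun x => x.1) false)
        (fun x => x.2) true).Pairwise pvR := by
  set items := (PySem.Dict.counter cs).items with hitems
  set s1 := PySem.List.sorted items (fun x => x.1) false with hs1
  have hperm1 : s1.Perm items := PySem.List.sorted_perm items (fun x => x.1) false
  have hnodup : (items.map (fun x => x.1)).Nodup := by
    rw [hitems, PySem.Dict.items_counter, List.map_map]
    simpa only [Function.comp_def, List.map_id'] using PySem.Set.nodup_ofList cs
  have hnodup1 : (s1.map (fun x => x.1)).Nodup := ((hperm1.map _).nodup_iff).2 hnodup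
  have hle : s1.Pairwise (fun a b => (a.1 : Char) ≤ b.1) := PySem.List.sorted_pairwise items (fun x => x.1)
  have hne : s1.Pairwise (fun a b => a.1 ≠ b.1) := (List.pairwise_map.1 hnodup1)
  have hlt : s1.Pairwise (fun a b => a.1 < b.1) :=
    (hle.and hne).imp (fun h => lt_of_le_of_ne h.1 h.2)
  exact ⟨(PySem.List.sorted_perm s1 (fun x => x.2) true).trans hperm1,
         sorted_rev_pairwise_pvR s1 hlt⟩

-- ===== VERDICT (by name: the statement is the Claim_ definition above) =====
theorem check_checksum_spec : Claim_equal_check_checksum := by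
  intro letters checksum _
  unfold Spec_check_checksum
  simp only [check_checksum, check_checksum_alt]
  rcases sorted_counter_spec letters.toList with ⟨hperm, hpair⟩
  rw [PySem.Dict.foldl_insert_getD_add_one_eq_counter]
  rw [pvSelect_eq_take 5 (PySem.Dict.counter letters.toList).items _ hperm hpair]
  rw [PySem.List.slice_to _ (by norm_num)]
  simp
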